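-- pv_equiv track=rewrite | github.com/ThayneStudio/orcest | src/orcest/worker/loop.py | _build_stream_names
-- ===== SOURCE A (Python) =====
-- def _build_stream_names(
--     key_prefixes: list[str], backend: str
-- ) -> tuple[list[str], list[str]]:
--     """Build fully-qualified stream names for multi-project reading.
--
--     Returns (pr_streams, issue_streams) where each stream name is
--     fully qualified (e.g. ``"myproject:tasks:claude"``).
--     """
--     pr_streams: list[str] = []
--     issue_streams: list[str] = []
--     seen_pr: set[str] = set()
--     seen_issue: set[str] = set()
--     for prefix in key_prefixes:
--         fq_prefix = prefix + ":"
--         pr_name = f"{fq_prefix}tasks:{backend}"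
--         issue_name = f"{fq_prefix}tasks:issue:{backend}"
--         if pr_name not in seen_pr:
--             seen_pr.add(pr_name)
--             pr_streams.append(pr_name)
--         if issue_name not in seen_issue:
--             seen_issue.add(issue_name)
--             issue_streams.append(issue_name)
--     return pr_streams, issue_streams
-- ===== SOURCE B (Python) =====
-- def _build_stream_names(
--     key_prefixes: list[str], backend: str
-- ) -> tuple[list[str], list[str]]:
--     """Dedup the prefixes once (order-preserving), then map twice.
--
--     Each stream name is injective in its prefix, so deduplicating the
--     prefixes first is equivalent to A's two separate name-based dedups.
--     """
--     unique = list(dict.fromkeys(key_prefixes))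
--     pr_streams = [f"{p}:tasks:{backend}" for p in unique]
--     issue_streams = [f"{p}:tasks:issue:{backend}" for p in unique]
--     return pr_streams, issue_streams
-- ===== Notes on version B (the rewrite author's own statement) =====
-- stated objective: simpler
-- what changed: Instead of one loop interleaving two seen-sets and two appends, B deduplicates the prefixes once (dict.fromkeys) and then builds each stream list as a separate mapping pass; correctness rests on each stream name being injective in its prefix.
import Mathlib
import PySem

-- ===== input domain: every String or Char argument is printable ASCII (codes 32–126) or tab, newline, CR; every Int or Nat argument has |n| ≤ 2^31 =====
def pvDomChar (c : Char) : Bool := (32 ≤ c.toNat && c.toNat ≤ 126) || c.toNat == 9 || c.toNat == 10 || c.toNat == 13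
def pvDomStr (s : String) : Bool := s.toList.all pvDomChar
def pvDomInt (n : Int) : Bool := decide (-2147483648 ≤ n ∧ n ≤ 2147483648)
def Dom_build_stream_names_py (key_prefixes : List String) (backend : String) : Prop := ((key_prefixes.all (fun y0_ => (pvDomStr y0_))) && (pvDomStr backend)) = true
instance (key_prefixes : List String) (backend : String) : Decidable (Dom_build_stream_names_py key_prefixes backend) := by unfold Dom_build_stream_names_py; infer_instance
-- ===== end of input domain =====

-- B deduplicates the prefixes once and then builds each list in a separate mapping pass,
-- instead of A's single loop interleaving two seen-sets and two conditional appends (objective: simpler).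

-- ===== PORT A =====
-- one iteration of A's loop body over the state (pr_streams, issue_streams, seen_pr, seen_issue)
def bsnStepA (backend : String)
    (st : List String × List String × PySem.Set String × PySem.Set String)
    (pfx : String) : List String × List String × PySem.Set String × PySem.Set String :=
  let fq_prefix := pfx ++ ":"
  let pr_name := fq_prefix ++ "tasks:" ++ backend
  let issue_name := fq_prefix ++ "tasks:issue:" ++ backend
  let st1 :=
    if st.2.2.1.contains pr_name then st
    else (st.1 ++ [pr_name], st.2.1, PySem.Set.add st.2.2.1 pr_name, st.2.2.2)
  if st1.2.2.2.contains issue_name then st1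
  else (st1.1, st1.2.1 ++ [issue_name], st1.2.2.1, PySem.Set.add st1.2.2.2 issue_name)

def build_stream_names_py (key_prefixes : List String) (backend : String) : List String × List String :=
  let st := key_prefixes.foldl (bsnStepA backend)
    (([] : List String), ([] : List String), (PySem.Set.empty : PySem.Set String), (PySem.Set.empty : PySem.Set String))
  (st.1, st.2.1)

-- ===== PORT B =====
def build_stream_names_py_alt (key_prefixes : List String) (backend : String) : List String × List String :=
  let unique := PySem.List.dedup key_prefixes
  (unique.map (fun p => p ++ ":tasks:" ++ backend),
   unique.map (fun p => p ++ ":tasks:issue:" ++ backend))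

-- ===== PRECONDITION & SPEC =====
def Spec_build_stream_names_py (key_prefixes : List String) (backend : String) (out : List String × List String) : Prop := out = build_stream_names_py_alt key_prefixes backend
instance (key_prefixes : List String) (backend : String) (out : List String × List String) : Decidable (Spec_build_stream_names_py key_prefixes backend out) := by unfold Spec_build_stream_names_py; infer_instance

-- ===== CLAIM (what is proved, stated in full; the proofs are below) =====
def Claim_equal_build_stream_names_py : Prop := ∀ (key_prefixes : List String) (backend : String), Dom_build_stream_names_py key_prefixes backend → Spec_build_stream_names_py key_prefixes backend (build_stream_names_py key_prefixes backend)

-- ===== LEMMAS AND PROOFS =====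

-- the pr / issue stream name of a prefix, in exactly the shape A's loop builds it
def bsnP (backend p : String) : String := p ++ ":" ++ "tasks:" ++ backend
def bsnI (backend p : String) : String := p ++ ":" ++ "tasks:issue:" ++ backend

-- order-preserving dedup of the remaining prefixes, given the prefixes already seen
def bsnNewUniq (seen : List String) : List String → List String
  | [] => []
  | p :: t => if seen.contains p then bsnNewUniq seen t else p :: bsnNewUniq (seen ++ [p]) t

theorem bsn_cancel {p q s : String} (h : p ++ s = q ++ s) : p = q := by
  have h2 := congrArg String.toList h
  simp only [String.toList_append] at h2
  exact String.toList_inj.mp (List.append_cancel_right h2)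

theorem bsnP_inj (backend : String) {p q : String} : bsnP backend q = bsnP backend p ↔ q = p := by
  constructor
  · intro h; exact bsn_cancel (bsn_cancel (bsn_cancel h))
  · intro h; rw [h]

theorem bsnI_inj (backend : String) {p q : String} : bsnI backend q = bsnI backend p ↔ q = p := by
  constructor
  · intro h; exact bsn_cancel (bsn_cancel (bsn_cancel h))
  · intro h; rw [h]

theorem bsnP_eq (backend p : String) : bsnP backend p = p ++ ":tasks:" ++ backend := by
  unfold bsnP
  congr 1
  rw [String.append_assoc]
  congr 1

theorem bsnI_eq (backend p : String) : bsnI backend p = p ++ ":tasks:issue:" ++ backend := by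
  unfold bsnI
  congr 1
  rw [String.append_assoc]
  congr 1

-- pushing one fresh name onto a seen-set keeps the "same membership as the seen prefixes" relation
theorem bsn_contains_snoc (f : String → String) (hf : ∀ {p q : String}, f q = f p ↔ q = p)
    (sp : PySem.Set String) (seen : List String) (p : String)
    (h : ∀ q : String, sp.contains (f q) = seen.contains q) (q : String) :
    (sp ++ [f p]).contains (f q) = (seen ++ [p]).contains q := by
  have hq := h q
  simp only [PySem.Set.contains, List.contains_eq_mem] at hq ⊢
  simp only [List.mem_append, List.mem_cons, List.not_mem_nil, or_false, Bool.decide_or]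
  rw [hq]
  congr 1
  rw [decide_eq_decide]
  exact hf

theorem bsn_invA (backend : String) (kps : List String) :
    ∀ (seen pr0 iss0 : List String) (sp si : PySem.Set String),
    (∀ q : String, sp.contains (bsnP backend q) = seen.contains q) →
    (∀ q : String, si.contains (bsnI backend q) = seen.contains q) →
    (kps.foldl (bsnStepA backend) (pr0, iss0, sp, si)).1
        = pr0 ++ (bsnNewUniq seen kps).map (bsnP backend)
    ∧ (kps.foldl (bsnStepA backend) (pr0, iss0, sp, si)).2.1
        = iss0 ++ (bsnNewUniq seen kps).map (bsnI backend) := by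
  induction kps with
  | nil => intro seen pr0 iss0 sp si _ _; simp [bsnNewUniq]
  | cons p t ih =>
    intro seen pr0 iss0 sp si hP hI
    simp only [List.foldl_cons]
    by_cases hseen : seen.contains p = true
    · have h1 : sp.contains (bsnP backend p) = true := by rw [hP p]; exact hseen
      have h2 : si.contains (bsnI backend p) = true := by rw [hI p]; exact hseen
      have e1 : bsnStepA backend (pr0, iss0, sp, si) p = (pr0, iss0, sp, si) := by
        simp only [bsnP] at h1
        simp only [bsnI] at h2
        simp only [bsnStepA]
        rw [h1]
        simp only [reduceIte]
        rw [h2]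
        simp
      rw [e1, bsnNewUniq]
      simp only [hseen, if_pos]
      exact ih seen pr0 iss0 sp si hP hI
    · have hseen' : seen.contains p = false := by simpa using hseen
      have h1 : sp.contains (bsnP backend p) = false := by rw [hP p]; exact hseen'
      have h2 : si.contains (bsnI backend p) = false := by rw [hI p]; exact hseen'
      have e1 : bsnStepA backend (pr0, iss0, sp, si) p
          = (pr0 ++ [bsnP backend p], iss0 ++ [bsnI backend p],
             sp ++ [bsnP backend p], si ++ [bsnI backend p]) := by
        simp only [bsnP] at h1
        simp only [bsnI] at h2
        simp only [PySem.Set.contains] at h1 h2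
        simp only [bsnStepA, PySem.Set.add, PySem.Set.contains]
        rw [h1]
        simp only [Bool.false_eq_true, reduceIte]
        rw [h2]
        simp only [Bool.false_eq_true, reduceIte]
        simp [bsnP, bsnI]
      rw [e1, bsnNewUniq]
      simp only [hseen', Bool.false_eq_true, if_neg, not_false_eq_true]
      obtain ⟨ih1, ih2⟩ := ih (seen ++ [p]) (pr0 ++ [bsnP backend p]) (iss0 ++ [bsnI backend p])
        (sp ++ [bsnP backend p]) (si ++ [bsnI backend p])
        (bsn_contains_snoc (bsnP backend) (bsnP_inj backend) sp seen p hP)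
        (bsn_contains_snoc (bsnI backend) (bsnI_inj backend) si seen p hI)
      rw [ih1, ih2]
      simp [List.append_assoc]

theorem bsn_ofList_eq_newUniq (xs : List String) :
    ∀ seen : List String, xs.foldl PySem.Set.add seen = seen ++ bsnNewUniq seen xs := by
  induction xs with
  | nil => intro seen; simp [bsnNewUniq]
  | cons p t ih =>
    intro seen
    simp only [List.foldl_cons, bsnNewUniq, PySem.Set.add, PySem.Set.contains]
    by_cases h : seen.contains p = true
    · simp only [h, if_pos]
      exact ih seen
    · have h' : seen.contains p = false := by simpa using h
      simp only [h', Bool.false_eq_true, if_neg, not_false_eq_true]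
      rw [ih (seen ++ [p])]
      simp [List.append_assoc]

theorem bsn_dedup_eq (xs : List String) : PySem.List.dedup xs = bsnNewUniq [] xs := by
  have h1 : PySem.List.dedup xs = PySem.Set.ofList xs := PySem.List.dedup_eq_ofList xs
  have h2 : PySem.Set.ofList xs = xs.foldl PySem.Set.add [] := PySem.Set.ofList_eq_foldl xs
  rw [h1, h2, bsn_ofList_eq_newUniq xs []]
  simp

-- ===== VERDICT (by name: the statement is the Claim_ definition above) =====
theorem build_stream_names_py_spec : Claim_equal_build_stream_names_py := by
  intro kps backend _
  unfold Spec_build_stream_names_py build_stream_names_py build_stream_names_py_alt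
  obtain ⟨h1, h2⟩ := bsn_invA backend kps [] [] [] PySem.Set.empty PySem.Set.empty
    (fun _ => rfl) (fun _ => rfl)
  simp only [h1, h2, bsn_dedup_eq, List.nil_append, Prod.mk.injEq]
  constructor
  · exact List.map_congr_left (fun p _ => bsnP_eq backend p)
  · exact List.map_congr_left (fun p _ => bsnI_eq backend p)
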